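-- pv_equiv track=rewrite | github.com/sector119/dz | ex8.py | count_degrees
-- ===== SOURCE A (Python) =====
-- def count_degrees(degrees_of_3, array):
--     count = 0
--     counts = []
--
--     for e in array:
--         if e in degrees_of_3:
--             count += 1
--         else:
--             counts.append(count)
--             count = 0
--
--     return counts
-- ===== SOURCE B (Python) =====
-- def count_degrees(degrees_of_3, array):
--     positions = [i for i, e in enumerate(array) if e not in degrees_of_3]
--     counts = []
--     prev = -1
--     for p in positions:
--         counts.append(p - prev - 1)
--         prev = p
--     return counts
-- ===== Notes on version B (the rewrite author's own statement) =====
-- stated objective: alternative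
-- what changed: B first collects the indices of not-found elements, then produces each run length by differencing consecutive indices (prev starts at -1), instead of A's single pass with a running counter that is reset on each not-found element.
import Mathlib
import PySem

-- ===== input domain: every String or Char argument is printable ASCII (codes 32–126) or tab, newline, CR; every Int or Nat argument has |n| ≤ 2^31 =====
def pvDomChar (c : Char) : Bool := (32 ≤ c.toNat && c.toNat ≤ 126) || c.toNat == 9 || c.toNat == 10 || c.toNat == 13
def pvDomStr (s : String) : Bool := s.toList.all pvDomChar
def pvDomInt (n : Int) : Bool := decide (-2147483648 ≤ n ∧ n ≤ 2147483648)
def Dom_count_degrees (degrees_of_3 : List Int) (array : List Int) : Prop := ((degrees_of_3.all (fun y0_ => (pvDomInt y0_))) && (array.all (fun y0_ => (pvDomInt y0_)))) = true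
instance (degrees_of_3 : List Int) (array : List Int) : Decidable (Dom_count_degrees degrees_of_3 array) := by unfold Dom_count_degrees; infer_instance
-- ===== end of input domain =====

-- ===== PORT A =====
-- B differs from A by decomposition: index collection + consecutive differencing vs running counter.
def count_degrees (degrees_of_3 : List Int) (array : List Int) : List Int :=
  (array.foldl
    (fun (s : Int × List Int) e =>
      if e ∈ degrees_of_3 then (s.1 + 1, s.2) else (0, s.2 ++ [s.1]))
    (0, [])).2

-- ===== PORT B =====
-- [i for i, e in enumerate(array) if e not in degrees_of_3], recursion carrying the index
def altPositions (degrees_of_3 : List Int) : List Int → Int → List Int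
  | [], _ => []
  | e :: rest, i =>
    if e ∈ degrees_of_3 then altPositions degrees_of_3 rest (i + 1)
    else i :: altPositions degrees_of_3 rest (i + 1)

def count_degrees_alt (degrees_of_3 : List Int) (array : List Int) : List Int :=
  (( altPositions degrees_of_3 array 0).foldl
    (fun (s : Int × List Int) p => (p, s.2 ++ [p - s.1 - 1]))
    (-1, [])).2

-- ===== PRECONDITION & SPEC =====
def Spec_count_degrees (degrees_of_3 : List Int) (array : List Int) (out : List Int) : Prop := out = count_degrees_alt degrees_of_3 array
instance (degrees_of_3 : List Int) (array : List Int) (out : List Int) : Decidable (Spec_count_degrees degrees_of_3 array out) := by unfold Spec_count_degrees; infer_instance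

-- ===== CLAIM (what is proved, stated in full; the proofs are below) =====
def Claim_equal_count_degrees : Prop := ∀ (degrees_of_3 : List Int) (array : List Int), Dom_count_degrees degrees_of_3 array → Spec_count_degrees degrees_of_3 array (count_degrees degrees_of_3 array)

-- ===== LEMMAS AND PROOFS =====

-- ===== VERDICT (by name: the statement is the Claim_ definition above) =====
-- Common specification of both programs: direct structural recursion with a running count.
def runSpec (d : List Int) (c : Int) : List Int → List Int
  | [] => []
  | e :: rest => if e ∈ d then runSpec d (c + 1) rest else c :: runSpec d 0 rest

theorem a_fold_eq (d : List Int) (a : List Int) :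
    ∀ (c : Int) (acc : List Int),
      (a.foldl (fun (s : Int × List Int) e =>
          if e ∈ d then (s.1 + 1, s.2) else (0, s.2 ++ [s.1])) (c, acc)).2
        = acc ++ runSpec d c a := by
  induction a with
  | nil => intro c acc; simp [runSpec]
  | cons e rest ih =>
    intro c acc
    by_cases h : e ∈ d <;> simp [List.foldl, runSpec, h, ih]

-- B's differencing fold rebuilt as the same runSpec
def gapsRec (prev : Int) : List Int → List Int
  | [] => []
  | p :: ps => (p - prev - 1) :: gapsRec p ps

theorem b_fold_eq (ps : List Int) :
    ∀ (prev : Int) (acc : List Int),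
      (ps.foldl (fun (s : Int × List Int) p => (p, s.2 ++ [p - s.1 - 1])) (prev, acc)).2
        = acc ++ gapsRec prev ps := by
  induction ps with
  | nil => intro prev acc; simp [gapsRec]
  | cons p ps ih =>
    intro prev acc
    simp [List.foldl, gapsRec, ih]

theorem gaps_positions (d : List Int) (a : List Int) :
    ∀ (i prev : Int),
      gapsRec prev (altPositions d a i) = runSpec d (i - prev - 1) a := by
  induction a with
  | nil => intro i prev; simp [altPositions, gapsRec, runSpec]
  | cons e rest ih =>
    intro i prev
    by_cases h : e ∈ d
    · have : i + 1 - prev - 1 = i - prev - 1 + 1 := by ring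
      simp [altPositions, runSpec, h, ih, this]
    · simp [altPositions, runSpec, gapsRec, h, ih]

-- ===== VERDICT (by name: the statement is the Claim_ definition above) =====
theorem count_degrees_spec : Claim_equal_count_degrees := by
  intro d a _
  unfold Spec_count_degrees count_degrees count_degrees_alt
  rw [a_fold_eq, b_fold_eq, gaps_positions]
  norm_num
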